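-- pv_equiv track=rewrite | github.com/justaVinz/trojan-input | src/evaluations.py | sort_evaluations
-- ===== SOURCE A (Python) =====
-- def sort_evaluations(evaluation_json: dict):
--     sorted_by_size = {}
--     for key, value in evaluation_json.items():
--         size = key.split("_")[1]
--         if size not in sorted_by_size:
--             sorted_by_size[size] = []
--         sorted_by_size[size].append({key: value})
--     return sorted_by_size
-- ===== SOURCE B (Python) =====
-- def sort_evaluations(evaluation_json: dict):
--     # Alternative decomposition: compute all size tokens up front, dedup them in
--     # first-occurrence order, and build each group with one filtering pass.
--     items = list(evaluation_json.items())
--     sizes = [k.split("_")[1] for k, _ in items]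
--     return {
--         size: [{k: v} for (k, v), s in zip(items, sizes) if s == size]
--         for size in dict.fromkeys(sizes)
--     }
-- ===== Notes on version B (the rewrite author's own statement) =====
-- stated objective: alternative
-- what changed: Replaces the single-pass accumulate-into-a-mapping grouping by a two-phase strategy: precompute every key's size token, dedup the tokens in first-occurrence order, then build each group by a filtering comprehension over the item list.
import Mathlib
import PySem

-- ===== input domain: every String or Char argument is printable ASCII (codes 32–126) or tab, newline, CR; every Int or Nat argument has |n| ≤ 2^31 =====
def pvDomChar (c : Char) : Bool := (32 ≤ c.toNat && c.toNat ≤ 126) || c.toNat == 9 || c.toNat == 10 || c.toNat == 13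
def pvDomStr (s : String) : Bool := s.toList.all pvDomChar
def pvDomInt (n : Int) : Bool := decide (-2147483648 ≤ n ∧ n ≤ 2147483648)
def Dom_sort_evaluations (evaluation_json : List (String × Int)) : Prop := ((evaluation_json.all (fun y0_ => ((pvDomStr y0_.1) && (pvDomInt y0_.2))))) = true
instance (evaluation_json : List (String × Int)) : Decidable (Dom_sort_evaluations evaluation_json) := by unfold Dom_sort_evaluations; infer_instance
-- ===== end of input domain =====

-- B groups by precomputing all size tokens, deduping them in first-occurrence order and
-- building each group with a filtering pass, instead of A's single-pass accumulator mapping.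

-- shared helper: key.split("_")[1] (both Pythons compute this same expression);
-- total via getD, the defaults being unreachable under Pre_
def pvTok (s : String) : String := (PySem.List.pyGet? ((PySem.Str.split? s "_").getD []) 1).getD ""

-- ===== PORT A =====
def sort_evaluations (evaluation_json : List (String × Int)) : List (String × List (List (String × Int))) :=
  (evaluation_json.foldl
    (fun d kv =>
      let size := pvTok kv.1
      let d1 := if d.contains size then d else d.insert size []
      d1.insert size (d1.getD size [] ++ [[(kv.1, kv.2)]]))
    PySem.Dict.empty).items

-- ===== PORT B =====
def sort_evaluations_alt (evaluation_json : List (String × Int)) : List (String × List (List (String × Int))) :=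
  let sizes := evaluation_json.map (fun kv => pvTok kv.1)
  (PySem.List.dedup sizes).map
    (fun size =>
      (size, ((evaluation_json.zip sizes).filter (fun p => p.2 == size)).map (fun p => [p.1])))

-- ===== PRECONDITION & SPEC =====
-- Pre_ excludes (a) keys with no "_", on which A's key.split("_")[1] raises IndexError (B raises too),
-- and (b) association lists with duplicate keys, which no Python mapping argument can denote.
def Pre_sort_evaluations (evaluation_json : List (String × Int)) : Prop :=
  (∀ kv ∈ evaluation_json, 2 ≤ ((PySem.Str.split? kv.1 "_").getD []).length) ∧
  (evaluation_json.map (·.1)).Nodup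
instance (evaluation_json : List (String × Int)) : Decidable (Pre_sort_evaluations evaluation_json) := by unfold Pre_sort_evaluations; infer_instance
def pvWitness_sort_evaluations : (List (String × Int)) := [("eval_10_acc", 1), ("eval_20_acc", 2), ("x_10", 3)]

def Spec_sort_evaluations (evaluation_json : List (String × Int)) (out : List (String × List (List (String × Int)))) : Prop := out = sort_evaluations_alt evaluation_json
instance (evaluation_json : List (String × Int)) (out : List (String × List (List (String × Int)))) : Decidable (Spec_sort_evaluations evaluation_json out) := by unfold Spec_sort_evaluations; infer_instance

-- ===== CLAIM (what is proved, stated in full; the proofs are below) =====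
def Claim_equal_sort_evaluations : Prop := ∀ (evaluation_json : List (String × Int)), Dom_sort_evaluations evaluation_json → Pre_sort_evaluations evaluation_json → Spec_sort_evaluations evaluation_json (sort_evaluations evaluation_json)

-- ===== LEMMAS AND PROOFS =====

-- proof-only abbreviations: A's loop body, and the (token, [entry]) pair list the loop is driven by
def pvStepA (d : PySem.Dict String (List (List (String × Int)))) (kv : String × Int) :
    PySem.Dict String (List (List (String × Int))) :=
  let size := pvTok kv.1
  let d1 := if d.contains size then d else d.insert size []
  d1.insert size (d1.getD size [] ++ [[(kv.1, kv.2)]])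

def pvPairs (l : List (String × Int)) : List (String × List (String × Int)) :=
  l.map (fun kv => (pvTok kv.1, [(kv.1, kv.2)]))

-- A's loop body equals a modify-with-default step
theorem pv_stepA_eq_modify (d : PySem.Dict String (List (List (String × Int)))) (kv : String × Int) :
    pvStepA d kv = d.modify (pvTok kv.1) [] (· ++ [[(kv.1, kv.2)]]) := by
  unfold pvStepA
  simp only [PySem.Dict.modify]
  by_cases h : d.contains (pvTok kv.1) = true
  · simp [h]
  · simp only [Bool.not_eq_true] at h
    simp [h, PySem.Dict.getD_insert_self, PySem.Dict.insert_insert_self,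
      PySem.Dict.getD_of_not_contains d _ h]

theorem pv_foldA (l : List (String × Int)) :
    l.foldl pvStepA PySem.Dict.empty
    = (pvPairs l).foldl (fun d p => d.modify p.1 [] (· ++ [p.2])) PySem.Dict.empty := by
  unfold pvPairs
  rw [List.foldl_map]
  exact PySem.List.foldl_congr_mem l _ _ _ (fun d kv _ => pv_stepA_eq_modify d kv)

theorem pv_filter_zip (l : List (String × Int)) (s : String) :
    ((pvPairs l).filter (fun p => p.1 == s)).map (fun p => p.2)
    = ((l.zip (l.map (fun kv => pvTok kv.1))).filter (fun p => p.2 == s)).map (fun p => [p.1]) := by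
  induction l with
  | nil => rfl
  | cons a t ih =>
    by_cases h : pvTok a.1 = s
    · simp [pvPairs, h] at ih ⊢; exact ih
    · simp [pvPairs, h] at ih ⊢; exact ih

theorem sort_evaluations_eq (l : List (String × Int)) :
    sort_evaluations l = sort_evaluations_alt l := by
  show (l.foldl pvStepA PySem.Dict.empty).items = _
  rw [pv_foldA]
  set D := (pvPairs l).foldl (fun d p => d.modify p.1 [] (· ++ [p.2])) PySem.Dict.empty with hD
  have hnd : D.keys.Nodup :=
    PySem.Dict.nodup_keys_foldl_modify_key (pvPairs l) (fun p => p.1) []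
      (fun _ p v => v ++ [p.2]) PySem.Dict.empty (by simp [PySem.Dict.keys_empty])
  have hkeys : D.keys = PySem.List.dedup (l.map (fun kv => pvTok kv.1)) := by
    have h1 : D.keys = PySem.Set.update PySem.Dict.empty.keys ((pvPairs l).map (fun p => p.1)) :=
      PySem.Dict.keys_foldl_modify_key (pvPairs l) (fun p => p.1) []
        (fun _ p v => v ++ [p.2]) PySem.Dict.empty
    rw [h1, PySem.List.dedup_eq_ofList, PySem.Set.ofList_eq_foldl]
    simp [pvPairs, PySem.Dict.keys_empty, PySem.Set.update, List.map_map, Function.comp_def]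
  rw [PySem.Dict.items_eq_map_keys D hnd [], hkeys]
  show _ = (PySem.List.dedup (l.map (fun kv => pvTok kv.1))).map _
  apply List.map_congr_left
  intro s _
  have hg : D.getD s [] = ((pvPairs l).filter (fun p => p.1 == s)).map (fun p => p.2) := by
    have := PySem.Dict.getD_foldl_modify_append (pvPairs l) PySem.Dict.empty s
    simpa [PySem.Dict.getD_empty] using this
  rw [hg, pv_filter_zip]

-- ===== VERDICT (by name: the statement is the Claim_ definition above) =====
theorem sort_evaluations_spec : Claim_equal_sort_evaluations := by
  intro l _ _
  unfold Spec_sort_evaluations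
  exact sort_evaluations_eq l
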